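-- pv_equiv track=rewrite | github.com/trodland/likningsgenerator | LikningGeneratorForWord.py | eq_to_MathML
-- ===== SOURCE A (Python) =====
-- def eq_to_MathML(eqList):
--     MathML_string = ''
--     first = True         # Brukes for å forhindre at det blir lagt til + før første ledd
--     negative = False     # Brukes for å forhindre at det blir lagt til + før negative ledd
--     eqList = eqList.split(";")
--
--     for ledd in eqList:
--         if ledd.startswith("-") and "/" not in ledd:
--                   negative = True
--
--         if ledd != "=" and not first and not negative:
--             MathML_string += '<mo>+</mo>'
--
--         first = False
--         negative = False
--
--         if "/" in ledd:
--             teller,nevner = ledd.split("/")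
--             MathML_string += f'<mfrac><mrow><mi>{teller}</mi></mrow><mi>{nevner}</mi></mfrac>'
--         else:
--             MathML_string += f'<mi>{ledd}</mi>'
--
--         if ledd == "=":
--             first = True
--
--         # Legg til støtte for potenser: https://developer.mozilla.org/en-US/docs/Web/MathML/Element/msup
--
--     return MathML_string
-- ===== SOURCE B (Python) =====
-- def eq_to_MathML(eqList):
--     tokens = eqList.split(";")
--     segments = []
--     cur = []
--     for t in tokens:
--         if t == "=":
--             segments.append(cur)
--             cur = []
--         else:
--             cur.append(t)
--     segments.append(cur)
--     return '<mi>=</mi>'.join(_render_segment(seg) for seg in segments)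
--
--
-- def _render_term(t):
--     if "/" in t:
--         num, den = t.split("/")
--         return f'<mfrac><mrow><mi>{num}</mi></mrow><mi>{den}</mi></mfrac>'
--     return f'<mi>{t}</mi>'
--
--
-- def _render_segment(seg):
--     if not seg:
--         return ''
--     parts = [_render_term(seg[0])]
--     for t in seg[1:]:
--         if not (t.startswith("-") and "/" not in t):
--             parts.append('<mo>+</mo>')
--         parts.append(_render_term(t))
--     return ''.join(parts)
-- ===== Notes on version B (the rewrite author's own statement) =====
-- stated objective: alternative
-- what changed: Replaces A's single loop carrying first/negative flags by splitting the token list into segments at the equals-sign tokens, rendering each segment by position (the first term of a segment gets no plus operator), and joining the rendered segments with the equals element.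
import Mathlib
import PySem

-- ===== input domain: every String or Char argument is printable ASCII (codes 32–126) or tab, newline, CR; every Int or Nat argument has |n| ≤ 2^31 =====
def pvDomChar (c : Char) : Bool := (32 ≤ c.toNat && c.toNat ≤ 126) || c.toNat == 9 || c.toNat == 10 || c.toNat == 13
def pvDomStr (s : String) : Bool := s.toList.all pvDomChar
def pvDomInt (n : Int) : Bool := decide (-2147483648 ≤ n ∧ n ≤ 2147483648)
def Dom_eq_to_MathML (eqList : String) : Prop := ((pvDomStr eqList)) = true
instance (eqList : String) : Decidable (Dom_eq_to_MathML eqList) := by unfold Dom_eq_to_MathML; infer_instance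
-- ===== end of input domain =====

-- B replaces A's carried first/negative flags by splitting the token list into '='-separated
-- segments and rendering each segment by position (objective: alternative decomposition, same cost).

-- ===== PORT A =====
-- A's loop over the ';'-tokens with state (MathML_string, first, negative); where the Python
-- two-way unpacking of the '/'-split would raise (a token with two or more '/', excluded by
-- Pre_) the port reads the first two pieces.
def eqA_loop : List (List Char) → List Char → Bool → Bool → List Char
  | [], acc, _, _ => acc
  | t :: rest, acc, first, negative =>
    let negative1 : Bool :=
      if PySem.Chars.startswith t ['-'] && !PySem.Chars.isIn ['/'] t then true else negative
    let acc1 : List Char :=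
      if t ≠ ['='] ∧ first = false ∧ negative1 = false then acc ++ "<mo>+</mo>".toList else acc
    let acc2 : List Char :=
      if PySem.Chars.isIn ['/'] t then
        let parts := PySem.Chars.splitOn t ['/']
        acc1 ++ "<mfrac><mrow><mi>".toList ++ parts.headD [] ++ "</mi></mrow><mi>".toList
             ++ (parts[1]?.getD []) ++ "</mi></mfrac>".toList
      else acc1 ++ "<mi>".toList ++ t ++ "</mi>".toList
    eqA_loop rest acc2 (if t = ['='] then true else false) false

def eq_to_MathML (eqList : String) : String :=
  String.ofList (eqA_loop (PySem.Chars.splitOn eqList.toList [';']) [] true false)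

-- ===== PORT B =====
-- _render_term of Source B (same raising corner handled the same way, excluded by Pre_)
def pvRenderTerm (t : List Char) : List Char :=
  if PySem.Chars.isIn ['/'] t then
    let parts := PySem.Chars.splitOn t ['/']
    "<mfrac><mrow><mi>".toList ++ parts.headD [] ++ "</mi></mrow><mi>".toList
      ++ (parts[1]?.getD []) ++ "</mi></mfrac>".toList
  else "<mi>".toList ++ t ++ "</mi>".toList

-- one step of _render_segment's loop: optional '<mo>+</mo>' then the rendered term
def pvPlusRender (acc t : List Char) : List Char :=
  (if PySem.Chars.startswith t ['-'] && !PySem.Chars.isIn ['/'] t then acc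
   else acc ++ "<mo>+</mo>".toList) ++ pvRenderTerm t

-- _render_segment of Source B
def pvRenderSeg : List (List Char) → List Char
  | [] => []
  | h :: rest => rest.foldl pvPlusRender (pvRenderTerm h)

-- the token-grouping loop of Source B
def pvSegLoop : List (List Char) → List (List Char) → List (List (List Char)) → List (List (List Char))
  | [], cur, segs => segs ++ [cur]
  | t :: rest, cur, segs =>
    if t = ['='] then pvSegLoop rest [] (segs ++ [cur])
    else pvSegLoop rest (cur ++ [t]) segs

def eq_to_MathML_alt (eqList : String) : String :=
  String.ofList (PySem.Chars.join "<mi>=</mi>".toList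
    ((pvSegLoop (PySem.Chars.splitOn eqList.toList [';']) [] []).map pvRenderSeg))

-- ===== PRECONDITION & SPEC =====
-- Pre_ excludes exactly the inputs where a ';'-token contains two or more '/' — there the
-- Python two-way unpacking of the '/'-split raises ValueError (in A and in B alike).
def Pre_eq_to_MathML (eqList : String) : Prop :=
  ∀ t ∈ PySem.Chars.splitOn eqList.toList [';'], PySem.Chars.count t ['/'] ≤ 1
instance (eqList : String) : Decidable (Pre_eq_to_MathML eqList) := by
  unfold Pre_eq_to_MathML; infer_instance
def pvWitness_eq_to_MathML : String := "2x;-3;=;x/4;-1/2"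

def Spec_eq_to_MathML (eqList : String) (out : String) : Prop := out = eq_to_MathML_alt eqList
instance (eqList : String) (out : String) : Decidable (Spec_eq_to_MathML eqList out) := by
  unfold Spec_eq_to_MathML; infer_instance

-- ===== CLAIM (what is proved, stated in full; the proofs are below) =====
def Claim_equal_eq_to_MathML : Prop := ∀ (eqList : String), Dom_eq_to_MathML eqList → Pre_eq_to_MathML eqList → Spec_eq_to_MathML eqList (eq_to_MathML eqList)

-- ===== LEMMAS AND PROOFS =====

-- the common value both loops compute on a token list, parametrised by A's 'first' flag
def fSpec : List (List Char) → Bool → List Char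
  | [], _ => []
  | t :: rest, first =>
    (if t ≠ ['='] ∧ first = false ∧
        (PySem.Chars.startswith t ['-'] && !PySem.Chars.isIn ['/'] t) = false
     then "<mo>+</mo>".toList else [])
      ++ pvRenderTerm t ++ fSpec rest (decide (t = ['=']))

theorem eqA_loop_eq_fSpec (ts : List (List Char)) (acc : List Char) (first : Bool) :
    eqA_loop ts acc first false = acc ++ fSpec ts first := by
  induction ts generalizing acc first with
  | nil => simp [eqA_loop, fSpec]
  | cons t rest ih =>
    simp only [eqA_loop, fSpec, pvRenderTerm]
    by_cases ht : t = ['='] <;>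
      rcases hneg : (PySem.Chars.startswith t ['-'] && !PySem.Chars.isIn ['/'] t) with _ | _ <;>
      rcases hf : first with _ | _ <;>
      simp [ht, ih] <;>
      split <;> simp

theorem pvSegLoop_append (ts : List (List Char)) (cur : List (List Char))
    (segs : List (List (List Char))) :
    pvSegLoop ts cur segs = segs ++ pvSegLoop ts cur [] := by
  induction ts generalizing cur segs with
  | nil => simp [pvSegLoop]
  | cons t rest ih =>
    simp only [pvSegLoop]
    split
    · rw [ih [] (segs ++ [cur]), ih [] ([] ++ [cur])]; simp
    · exact ih _ _

theorem pvSegLoop_ne_nil (ts : List (List Char)) (cur : List (List Char)) :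
    pvSegLoop ts cur [] ≠ [] := by
  induction ts generalizing cur with
  | nil => simp [pvSegLoop]
  | cons t rest ih =>
    simp only [pvSegLoop]
    split
    · rw [pvSegLoop_append]; simp
    · exact ih _

theorem renderSeg_append (cur : List (List Char)) (t : List Char) (ht : t ≠ ['=']) :
    pvRenderSeg (cur ++ [t]) =
      pvRenderSeg cur
        ++ (if t ≠ ['='] ∧ decide (cur = []) = false ∧
              (PySem.Chars.startswith t ['-'] && !PySem.Chars.isIn ['/'] t) = false
            then "<mo>+</mo>".toList else [])
        ++ pvRenderTerm t := by
  cases cur with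
  | nil => simp [pvRenderSeg]
  | cons c cs =>
    simp only [pvRenderSeg, List.cons_append, List.foldl_append, List.foldl_cons, List.foldl_nil]
    rcases hneg : (PySem.Chars.startswith t ['-'] && !PySem.Chars.isIn ['/'] t) with _ | _ <;>
      simp [pvPlusRender, hneg, ht]

theorem segLoop_join (ts : List (List Char)) (cur : List (List Char)) :
    PySem.Chars.join "<mi>=</mi>".toList ((pvSegLoop ts cur []).map pvRenderSeg) =
      pvRenderSeg cur ++ fSpec ts (decide (cur = [])) := by
  induction ts generalizing cur with
  | nil => simp [pvSegLoop, fSpec, PySem.Chars.join_singleton]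
  | cons t rest ih =>
    simp only [pvSegLoop]
    by_cases ht : t = ['=']
    · subst ht
      obtain ⟨h, tl, hh⟩ : ∃ h tl, pvSegLoop rest ([] : List (List Char)) [] = h :: tl := by
        rcases he : pvSegLoop rest ([] : List (List Char)) [] with _ | ⟨h, tl⟩
        · exact absurd he (pvSegLoop_ne_nil _ _)
        · exact ⟨h, tl, rfl⟩
      rw [if_pos rfl, pvSegLoop_append, hh]
      have h2 := ih ([] : List (List Char))
      rw [hh] at h2
      simp only [List.map_cons, List.nil_append, List.singleton_append,
        PySem.Chars.join_cons_cons] at h2 ⊢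
      rw [h2]
      simp [pvRenderSeg, pvRenderTerm, fSpec]
      rfl
    · rw [if_neg ht, ih (cur ++ [t])]
      simp only [fSpec]
      rw [renderSeg_append cur t ht]
      simp [ht]

theorem ports_agree (eqList : String) : eq_to_MathML eqList = eq_to_MathML_alt eqList := by
  unfold eq_to_MathML eq_to_MathML_alt
  rw [eqA_loop_eq_fSpec, segLoop_join]
  simp [pvRenderSeg]

-- ===== VERDICT (by name: the statement is the Claim_ definition above) =====
theorem eq_to_MathML_spec : Claim_equal_eq_to_MathML := by
  intro eqList _ _
  unfold Spec_eq_to_MathML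
  exact ports_agree eqList
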